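-- pv_equiv track=rewrite | github.com/Roronoah-sudo/nihongo-quest | ui/dialog_box.py | _strip_furigana
-- ===== SOURCE A (Python) =====
-- def _strip_furigana(text):
--     """Remove furigana markup, leaving only the base kanji/text."""
--     result = []
--     i = 0
--     while i < len(text):
--         if text[i] == '{':
--             end = text.find('}', i)
--             if end == -1:
--                 result.append(text[i:])
--                 break
--             inner = text[i + 1:end]
--             if '|' in inner:
--                 base, _ = inner.split('|', 1)
--                 result.append(base)
--             else:
--                 result.append(inner)
--             i = end + 1
--         else:
--             result.append(text[i])
--             i += 1
--     return ''.join(result)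
-- ===== SOURCE B (Python) =====
-- import re
--
-- _FURIGANA_RE = re.compile(r'\{([^}]*)\}')
--
--
-- def _strip_furigana(text):
--     """Remove furigana markup, leaving only the base kanji/text."""
--     return _FURIGANA_RE.sub(lambda m: m.group(1).split('|', 1)[0], text)
-- ===== Notes on version B (the rewrite author's own statement) =====
-- stated objective: idiomatic
-- what changed: Replaced A's hand-written character-by-character index state machine (while loop, find, manual slicing, list accumulator) by a single re.sub over the compiled pattern for brace groups, the replacement keeping the part of the group before its first pipe separator.
import Mathlib
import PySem

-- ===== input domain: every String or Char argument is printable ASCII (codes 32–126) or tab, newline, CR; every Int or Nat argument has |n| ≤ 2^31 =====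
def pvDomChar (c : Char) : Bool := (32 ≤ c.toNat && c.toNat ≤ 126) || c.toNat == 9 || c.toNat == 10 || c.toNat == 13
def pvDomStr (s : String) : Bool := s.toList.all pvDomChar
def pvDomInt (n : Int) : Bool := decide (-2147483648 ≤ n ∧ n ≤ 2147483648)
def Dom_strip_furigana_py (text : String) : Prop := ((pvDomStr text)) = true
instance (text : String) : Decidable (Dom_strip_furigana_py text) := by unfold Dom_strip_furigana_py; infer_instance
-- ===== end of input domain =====

-- B replaces A's hand-written index state machine by a single regex substitution
-- (re.sub of \{([^}]*)\}, replaced by the group's part before its first '|') — more idiomatic, same values.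

-- ===== PORT A =====
-- A's while loop over index i, transcribed as recursion on the remaining suffix of the
-- text (i ↔ amount dropped); `result`/acc is kept flattened: ''.join of the appended
-- pieces is their concatenation.
def stripAGo (cs : List Char) (acc : List Char) : List Char :=
  match cs with
  | [] => acc                                                -- i = len(text): loop ends, return ''.join(result)
  | c :: rest =>
    if c = '{' then
      let e := PySem.Chars.find (c :: rest) ['}']            -- end = text.find('}', i)
      if e = -1 then acc ++ (c :: rest)                      -- result.append(text[i:]); break
      else
        let inner := PySem.List.slice (c :: rest) (some 1) (some e)   -- inner = text[i+1:end]
        let piece :=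
          if PySem.Chars.isIn ['|'] inner                    -- '|' in inner
          then inner.takeWhile (fun ch => ch != '|')         -- base, _ = inner.split('|', 1): base = chars before the first '|' (exact)
          else inner
        stripAGo ((c :: rest).drop (e.toNat + 1)) (acc ++ piece)      -- i = end + 1
    else stripAGo rest (acc ++ [c])                          -- result.append(text[i]); i += 1
termination_by cs.length
decreasing_by
  · simp only [List.length_drop, List.length_cons]; omega
  · simp only [List.length_cons]; omega

def strip_furigana_py (text : String) : String :=
  String.ofList (stripAGo text.toList [])

-- ===== PORT B =====
-- Hand port of re.sub(r'\{([^}]*)\}', repl, text), exact for this pattern: at each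
-- position the engine tries the pattern — literal '{', then greedy [^}]* (precisely the
-- characters before the next '}'), then literal '}'; on a match it emits repl(m) and
-- resumes right after the match, otherwise it copies one character and advances.
def reMatchAt (cs : List Char) : Option (List Char × List Char) :=
  match cs with
  | [] => none
  | c :: rest =>
    if c = '{' then
      let g := rest.takeWhile (fun ch => ch != '}')          -- greedy [^}]*
      match rest.drop g.length with
      | x :: r' => if x = '}' then some (g, r') else none    -- closing literal '}': group 1 = g
      | [] => none
    else none

theorem reMatchAt_length {cs g r' : List Char} (h : reMatchAt cs = some (g, r')) :
    r'.length < cs.length := by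
  match cs with
  | [] => simp [reMatchAt] at h
  | c :: rest =>
    simp only [reMatchAt] at h
    by_cases hc : c = '{'
    · rw [if_pos hc] at h
      cases hd : rest.drop (rest.takeWhile (fun ch => ch != '}')).length with
      | nil => rw [hd] at h; simp at h
      | cons x xs =>
        rw [hd] at h
        by_cases hx : x = '}'
        · subst hx
          simp at h
          have hr := congrArg List.length h.2
          have hlen := congrArg List.length hd
          simp only [List.length_drop, List.length_cons] at hlen
          simp only [List.length_cons]
          omega
        · simp [hx] at h
    · rw [if_neg hc] at h; simp at h

def reSubGo (cs : List Char) : List Char :=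
  match cs with
  | [] => []
  | c :: rest =>
    match h : reMatchAt (c :: rest) with
    | some (g, r') => (g.takeWhile (fun ch => ch != '|')) ++ reSubGo r'   -- m.group(1).split('|', 1)[0] (exact)
    | none => c :: reSubGo rest                              -- no match at this position: copy one char
termination_by cs.length
decreasing_by
  · have := reMatchAt_length h; simpa using this
  · simp only [List.length_cons]; omega

def strip_furigana_py_alt (text : String) : String :=
  String.ofList (reSubGo text.toList)

-- ===== PRECONDITION & SPEC =====
def Spec_strip_furigana_py (text : String) (out : String) : Prop := out = strip_furigana_py_alt text
instance (text : String) (out : String) : Decidable (Spec_strip_furigana_py text out) := by unfold Spec_strip_furigana_py; infer_instance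

-- ===== CLAIM (what is proved, stated in full; the proofs are below) =====
def Claim_equal_strip_furigana_py : Prop := ∀ (text : String), Dom_strip_furigana_py text → Spec_strip_furigana_py text (strip_furigana_py text)

-- ===== LEMMAS AND PROOFS =====

theorem drop_takeWhile_length (p : Char → Bool) (l : List Char) :
    l.drop (l.takeWhile p).length = l.dropWhile p := by
  induction l with
  | nil => simp
  | cons a t ih => by_cases ha : p a <;> simp [List.takeWhile_cons, List.dropWhile_cons, ha, ih]

theorem take_takeWhile_length (p : Char → Bool) (l : List Char) :
    l.take (l.takeWhile p).length = l.takeWhile p :=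
  (List.prefix_iff_eq_take.mp (List.takeWhile_prefix p)).symm

-- str.find for a single-character needle: the length of the maximal needle-free prefix.
theorem find_single (l : List Char) (ch : Char) :
    PySem.Chars.find l [ch] =
      if ch ∈ l then ((l.takeWhile (fun c => c != ch)).length : Int) else -1 := by
  by_cases hm : ch ∈ l
  · have hpos : 0 ≤ PySem.Chars.find l [ch] := by
      rw [PySem.Chars.find_nonneg_iff, List.singleton_infix_iff]; exact hm
    obtain ⟨hpre, hmin⟩ := PySem.Chars.find_spec hpos
    have hdw := drop_takeWhile_length (fun c => c != ch) l
    have hne : l.dropWhile (fun c => c != ch) ≠ [] := fun hnil => by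
      have := List.dropWhile_eq_nil_iff.mp hnil ch hm
      simp at this
    obtain ⟨x, xs, hx⟩ := List.exists_cons_of_ne_nil hne
    have hxch : x = ch := by
      have hh := List.head_dropWhile_not (fun c => c != ch) hne
      simp only [hx, List.head_cons] at hh
      simpa using hh
    have hpre_m : [ch] <+: l.drop (l.takeWhile (fun c => c != ch)).length := by
      rw [hdw, hx, hxch]; exact ⟨xs, rfl⟩
    have hfail : ∀ i < (l.takeWhile (fun c => c != ch)).length, ¬ [ch] <+: l.drop i := by
      intro i hi hp
      have hip : i < l.length := by
        have := (List.takeWhile_prefix (p := fun c => c != ch) (l := l)).length_le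
        omega
      have hp' : (l.drop i).head? = some ch := by
        obtain ⟨t, ht⟩ := hp
        rw [← ht]; rfl
      rw [List.head?_drop, List.getElem?_eq_getElem hip, Option.some.injEq] at hp'
      have hmem : l[i] ∈ l.takeWhile (fun c => c != ch) := by
        have hg : (l.takeWhile (fun c => c != ch))[i]'(by omega) = l[i] :=
          (List.takeWhile_prefix (p := fun c => c != ch)).getElem (by omega)
        rw [← hg]; exact List.getElem_mem _
      have := List.mem_takeWhile_imp hmem
      rw [hp'] at this
      simp at this
    have h1 : (PySem.Chars.find l [ch]).toNat ≤ (l.takeWhile (fun c => c != ch)).length := by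
      by_contra hlt
      exact hmin _ (by omega) hpre_m
    have h2 : (l.takeWhile (fun c => c != ch)).length ≤ (PySem.Chars.find l [ch]).toNat := by
      by_contra hlt
      exact hfail _ (by omega) hpre
    have heq : (PySem.Chars.find l [ch]).toNat = (l.takeWhile (fun c => c != ch)).length :=
      le_antisymm h1 h2
    rw [if_pos hm, ← heq, Int.toNat_of_nonneg hpos]
  · have : PySem.Chars.find l [ch] = -1 := by
      rw [PySem.Chars.find_eq_neg_one_iff, List.singleton_infix_iff]; exact hm
    rw [if_neg hm, this]

-- no '}' in the text: the pattern never matches and re.sub copies everything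
theorem reSubGo_no_close (l : List Char) (h : '}' ∉ l) : reSubGo l = l := by
  induction l with
  | nil => rw [reSubGo]
  | cons c rest ih =>
    have hrest : '}' ∉ rest := fun hr => h (List.mem_cons_of_mem _ hr)
    have hmatch : reMatchAt (c :: rest) = none := by
      simp only [reMatchAt]
      by_cases hc : c = '{'
      · rw [if_pos hc]
        have hall : rest.takeWhile (fun ch => ch != '}') = rest :=
          List.takeWhile_eq_self_iff.mpr (fun x hx => by
            simp only [bne_iff_ne, ne_eq]
            exact fun he => hrest (he ▸ hx))
        rw [hall]
        simp
      · rw [if_neg hc]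
    rw [reSubGo]
    rw [hmatch]
    exact congrArg (c :: ·) (ih hrest)

theorem stripAGo_eq (n : Nat) : ∀ cs acc, cs.length ≤ n → stripAGo cs acc = acc ++ reSubGo cs := by
  induction n with
  | zero =>
    intro cs acc hlen
    have : cs = [] := List.eq_nil_of_length_eq_zero (by omega)
    subst this; rw [stripAGo, reSubGo]; simp
  | succ n ih =>
    intro cs acc hlen
    match cs with
    | [] => rw [stripAGo, reSubGo]; simp
    | c :: rest =>
      by_cases hc : c = '{'
      · subst hc
        by_cases hm : '}' ∈ rest
        · -- a closing brace exists: both sides consume up to and including it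
          have hdw := drop_takeWhile_length (fun ch => ch != '}') rest
          have hne : rest.dropWhile (fun ch => ch != '}') ≠ [] := fun hnil => by
            have := List.dropWhile_eq_nil_iff.mp hnil '}' hm
            simp at this
          obtain ⟨x, xs, hx⟩ := List.exists_cons_of_ne_nil hne
          have hxch : x = '}' := by
            have hh := List.head_dropWhile_not (fun ch => ch != '}') hne
            simp only [hx, List.head_cons] at hh
            simpa using hh
          subst hxch
          have hdrop : rest.drop (rest.takeWhile (fun ch => ch != '}')).length = '}' :: xs := by
            rw [hdw, hx]
          have hfind : PySem.Chars.find ('{' :: rest) ['}'] =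
              (((rest.takeWhile (fun ch => ch != '}')).length + 1 : Nat) : Int) := by
            rw [find_single, if_pos (List.mem_cons_of_mem _ hm), List.takeWhile_cons]
            simp
          have hlrest := congrArg List.length hdrop
          simp only [List.length_drop, List.length_cons] at hlrest
          have hlen' : xs.length ≤ n := by
            simp only [List.length_cons] at hlen; omega
          have hmatch : reMatchAt ('{' :: rest) =
              some (rest.takeWhile (fun ch => ch != '}'), xs) := by
            simp only [reMatchAt, if_pos rfl, hdrop]
            simp
          have hslice : PySem.List.slice ('{' :: rest) (some 1)
              (some (((rest.takeWhile (fun ch => ch != '}')).length + 1 : Nat) : Int)) =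
              rest.takeWhile (fun ch => ch != '}') := by
            rw [show (some (1 : Int)) = some (((1 : Nat) : Int)) by norm_num,
              PySem.List.slice_natCast]
            simp only [List.drop_succ_cons, List.drop_zero, Nat.add_sub_cancel]
            exact take_takeWhile_length _ _
          have hpiece :
              (if PySem.Chars.isIn ['|'] (rest.takeWhile (fun ch => ch != '}'))
               then (rest.takeWhile (fun ch => ch != '}')).takeWhile (fun ch => ch != '|')
               else rest.takeWhile (fun ch => ch != '}')) =
              (rest.takeWhile (fun ch => ch != '}')).takeWhile (fun ch => ch != '|') := by
            by_cases hp : '|' ∈ rest.takeWhile (fun ch => ch != '}')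
            · rw [if_pos (by rw [PySem.Chars.isIn_iff_infix, List.singleton_infix_iff]; exact hp)]
            · have hts : (rest.takeWhile (fun ch => ch != '}')).takeWhile (fun ch => ch != '|') =
                  rest.takeWhile (fun ch => ch != '}') :=
                List.takeWhile_eq_self_iff.mpr (fun y hy => by
                  simp only [bne_iff_ne, ne_eq]
                  exact fun he => hp (he ▸ hy))
              rw [if_neg (by rw [PySem.Chars.isIn_iff_infix, List.singleton_infix_iff]; exact hp)]
              exact hts.symm
          have hdrop2 : rest.drop ((rest.takeWhile (fun ch => ch != '}')).length + 1) = xs := by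
            have h1 := congrArg (List.drop 1) hdrop
            rw [List.drop_drop] at h1
            simpa [Nat.add_comm] using h1
          rw [reSubGo, hmatch, stripAGo]
          simp only [if_pos rfl, hfind, hslice, Int.toNat_natCast]
          rw [if_neg (show ¬((((rest.takeWhile (fun ch => ch != '}')).length + 1 : Nat) : Int) = -1) by omega)]
          rw [hpiece]
          rw [List.drop_succ_cons, hdrop2, ih xs _ hlen']
          simp [List.append_assoc]
        · -- no closing brace: A appends the whole suffix and breaks; re.sub finds no match
          have hm' : '}' ∉ '{' :: rest := by simp [hm]
          have hfind : PySem.Chars.find ('{' :: rest) ['}'] = -1 := by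
            rw [find_single, if_neg hm']
          rw [stripAGo, if_pos rfl, hfind, if_pos rfl, reSubGo_no_close _ hm']
      · rw [stripAGo, reSubGo]
        have hmatch : reMatchAt (c :: rest) = none := by
          simp only [reMatchAt]; rw [if_neg hc]
        rw [if_neg hc, hmatch, ih rest (acc ++ [c]) (by simp only [List.length_cons] at hlen; omega)]
        simp

-- ===== VERDICT (by name: the statement is the Claim_ definition above) =====
theorem strip_furigana_py_spec : Claim_equal_strip_furigana_py := by
  intro text _
  unfold Spec_strip_furigana_py strip_furigana_py strip_furigana_py_alt
  rw [stripAGo_eq text.toList.length text.toList [] le_rfl]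
  simp
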